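-- pv_equiv track=rewrite | github.com/mh70cz/mypy | challenges/pybites/bite_118.py | get_duplicate_indices
-- ===== SOURCE A (Python) =====
-- def get_duplicate_indices(words):
--     """Given a list of words, loop through the words and check for each
--        word if it occurs more than once.
--        If so return the index of its first ocurrence.
--        For example in the following list 'is' and 'it'
--        occurr more than once, and they are at indices 0 and 1 so you would
--        return [0, 1]:
--        ['is', 'it', 'true', 'or', 'is', 'it', 'not?'] => [0, 1]
--        Make sure the returning list is unique and sorted in ascending order."""
--     lst_idx = []
--     sorted_set_words = sorted(set(words), key = lambda x: words.index(x))
--     for w in sorted_set_words: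
--         if words.count(w) > 1:
--             idx = words.index(w)
--             lst_idx.append(idx)
--     return lst_idx
-- ===== SOURCE B (Python) =====
-- def get_duplicate_indices(words):
--     first = {}
--     dups = set()
--     for i, w in enumerate(words):
--         if w in first:
--             dups.add(first[w])
--         else:
--             first[w] = i
--     return sorted(dups)
-- ===== Notes on version B (the rewrite author's own statement) =====
-- stated objective: faster
-- what changed: Replaces per-unique-word full-list count/index scans (after sorting the set by words.index) with a single enumerate pass keeping a first-seen-index dict and a set of duplicate first indices, then one final sort.
import Mathlib
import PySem

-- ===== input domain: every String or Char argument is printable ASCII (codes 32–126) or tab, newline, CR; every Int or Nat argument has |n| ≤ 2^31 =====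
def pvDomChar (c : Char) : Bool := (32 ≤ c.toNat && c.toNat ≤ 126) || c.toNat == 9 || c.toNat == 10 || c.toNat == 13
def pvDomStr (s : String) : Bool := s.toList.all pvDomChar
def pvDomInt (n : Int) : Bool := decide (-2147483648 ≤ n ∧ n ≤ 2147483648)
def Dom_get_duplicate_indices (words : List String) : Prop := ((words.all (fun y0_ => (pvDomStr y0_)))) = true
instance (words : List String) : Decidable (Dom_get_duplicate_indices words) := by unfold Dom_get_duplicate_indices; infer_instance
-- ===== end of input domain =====

-- B replaces A's per-unique-word count/index full-list scans with one enumerate pass over a first-seen-index dict plus a set of duplicate first indices, then one final sort.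

-- ===== PORT A =====
-- words.index(x) for x drawn from set(words) always succeeds, so the total `.getD 0` form is exact here.
def get_duplicate_indices (words : List String) : List Int :=
  let sorted_set_words :=
    PySem.List.sorted (PySem.Set.ofList words)
      (fun x => (PySem.List.index? words x).getD 0) false
  sorted_set_words.foldl
    (fun lst_idx w =>
      if 1 < PySem.List.count words w then
        lst_idx ++ [(((PySem.List.index? words w).getD 0 : Nat) : Int)]
      else lst_idx) []

-- ===== PORT B =====
-- `first[w]` is read only after `w in first` succeeded, so the total `.getD 0` form is exact here.
def get_duplicate_indices_alt (words : List String) : List Int :=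
  let st := (PySem.List.enumerate words 0).foldl
    (fun (st : PySem.Dict String Int × PySem.Set Int) p =>
      if st.1.contains p.2 then
        (st.1, PySem.Set.add st.2 (st.1.getD p.2 0))
      else
        (st.1.insert p.2 p.1, st.2))
    (PySem.Dict.empty, PySem.Set.empty)
  PySem.List.sorted st.2 (fun x => x) false

-- ===== PRECONDITION & SPEC =====
def Spec_get_duplicate_indices (words : List String) (out : List Int) : Prop := out = get_duplicate_indices_alt words
instance (words : List String) (out : List Int) : Decidable (Spec_get_duplicate_indices words out) := by unfold Spec_get_duplicate_indices; infer_instance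

-- ===== CLAIM (what is proved, stated in full; the proofs are below) =====
def Claim_equal_get_duplicate_indices : Prop := ∀ (words : List String), Dom_get_duplicate_indices words → Spec_get_duplicate_indices words (get_duplicate_indices words)

-- ===== LEMMAS AND PROOFS =====

-- the canonical value both programs compute: first indices of duplicated words, in first-occurrence order
def pvSpecList (words : List String) : List Int :=
  ((PySem.Set.ofList words).filter (fun w => decide (1 < PySem.List.count words w))).map
    (fun w => (((PySem.List.index? words w).getD 0 : Nat) : Int))

-- set(words) in A is already in first-occurrence order, so its words.index keys strictly increase
theorem pvDedup_pairwise (words : List String) :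
    (PySem.Set.ofList words).Pairwise
      (fun a b => (PySem.List.index? words a).getD 0 < (PySem.List.index? words b).getD 0) := by
  induction words with
  | nil => simp [PySem.Set.ofList]
  | cons x xs ih =>
    rw [PySem.Set.ofList_cons]
    constructor
    · intro y hy
      have h := (PySem.Set.mem_discard (PySem.Set.ofList xs) x y).mp hy
      have hymem : y ∈ xs := (PySem.Set.mem_ofList xs y).mp h.1
      rw [PySem.List.index?_cons_self, PySem.List.index?_cons_of_ne xs (Ne.symm h.2)]
      obtain ⟨k, hk⟩ := Option.isSome_iff_exists.mp ((PySem.List.index?_isSome_iff xs y).mpr hymem)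
      rw [PySem.List.index?_eq_idxOf?] at hk
      simp [hk]
    · have hsub : List.Sublist ((PySem.Set.ofList xs).discard x) (PySem.Set.ofList xs) := by
        simp only [PySem.Set.discard]
        exact List.filter_sublist
      refine List.Pairwise.imp_of_mem ?_ (ih.sublist hsub)
      intro a b ha hb hab
      have haa := (PySem.Set.mem_discard _ _ _).mp ha
      have hbb := (PySem.Set.mem_discard _ _ _).mp hb
      have ham : a ∈ xs := (PySem.Set.mem_ofList xs a).mp haa.1
      have hbm : b ∈ xs := (PySem.Set.mem_ofList xs b).mp hbb.1
      rw [PySem.List.index?_cons_of_ne xs (Ne.symm haa.2), PySem.List.index?_cons_of_ne xs (Ne.symm hbb.2)]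
      obtain ⟨k, hk⟩ := Option.isSome_iff_exists.mp ((PySem.List.index?_isSome_iff xs a).mpr ham)
      obtain ⟨m, hm⟩ := Option.isSome_iff_exists.mp ((PySem.List.index?_isSome_iff xs b).mpr hbm)
      rw [hk, hm] at hab ⊢
      simpa using hab

theorem pvA_eq_spec (words : List String) : get_duplicate_indices words = pvSpecList words := by
  unfold get_duplicate_indices pvSpecList
  rw [PySem.List.sorted_eq_self_of_pairwise _ _
    ((pvDedup_pairwise words).imp (fun h => le_of_lt h))]
  have h := PySem.List.foldl_append_if (fun w => decide (1 < PySem.List.count words w))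
    (fun w => (((PySem.List.index? words w).getD 0 : Nat) : Int)) (PySem.Set.ofList words) []
  simp only [decide_eq_true_eq] at h
  simpa using h

theorem pvSpec_pairwise (words : List String) : (pvSpecList words).Pairwise (· < ·) := by
  unfold pvSpecList
  rw [List.pairwise_map]
  refine List.Pairwise.imp_of_mem ?_ ((pvDedup_pairwise words).sublist List.filter_sublist)
  intro a b _ _ hab
  exact_mod_cast hab

-- the state of B's enumerate loop, named for the invariant below
def pvLoop (words : List String) : PySem.Dict String Int × PySem.Set Int :=
  (PySem.List.enumerate words 0).foldl
    (fun (st : PySem.Dict String Int × PySem.Set Int) p =>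
      if st.1.contains p.2 then
        (st.1, PySem.Set.add st.2 (st.1.getD p.2 0))
      else
        (st.1.insert p.2 p.1, st.2))
    (PySem.Dict.empty, PySem.Set.empty)

-- invariant of B's loop: `first` maps each seen word to its first index, `dups` holds exactly the first indices of duplicated words
theorem pvLoop_inv (words : List String) :
    (∀ x, (pvLoop words).1.get? x = (PySem.List.index? words x).map (fun k => (k : Int)))
    ∧ (pvLoop words).2.Nodup
    ∧ (∀ y, y ∈ (pvLoop words).2 ↔
        ∃ w, w ∈ words ∧ 1 < PySem.List.count words w ∧
          y = (((PySem.List.index? words w).getD 0 : Nat) : Int)) := by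
  induction words using List.reverseRecOn with
  | nil =>
    refine ⟨fun x => ?_, List.nodup_nil, fun y => ?_⟩
    · simp [pvLoop, PySem.List.enumerate, PySem.Dict.get?_empty, PySem.List.index?_eq_idxOf?]
    · simp [pvLoop, PySem.List.enumerate, PySem.Set.empty]
  | append_singleton ws w ih =>
    obtain ⟨ih1, ih2, ih3⟩ := ih
    have hstep : pvLoop (ws ++ [w]) =
        (if (pvLoop ws).1.contains w then
          ((pvLoop ws).1, PySem.Set.add (pvLoop ws).2 ((pvLoop ws).1.getD w 0))
        else
          ((pvLoop ws).1.insert w ((0 : Int) + ws.length), (pvLoop ws).2)) := by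
      rw [pvLoop, PySem.List.enumerate_append, List.foldl_append]
      rw [PySem.List.enumerate_cons]
      simp only [PySem.List.enumerate_nil, List.foldl_cons, List.foldl_nil]
      rfl
    have hcont : (pvLoop ws).1.contains w = (PySem.List.index? ws w).isSome := by
      rw [PySem.Dict.contains_eq_isSome_get?, ih1 w]
      cases PySem.List.index? ws w <;> rfl
    by_cases hmem : w ∈ ws
    · obtain ⟨k, hk⟩ := Option.isSome_iff_exists.mp ((PySem.List.index?_isSome_iff ws w).mpr hmem)
      have hc : (pvLoop ws).1.contains w = true := by
        rw [hcont, hk]; rfl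
      rw [hstep, if_pos hc]
      have hidx : ∀ x, PySem.List.index? (ws ++ [w]) x = PySem.List.index? ws x := by
        intro x
        by_cases hx : x ∈ ws
        · exact PySem.List.index?_append_of_mem [w] hx
        · have hxw : x ≠ w := fun h => hx (h ▸ hmem)
          rw [(PySem.List.index?_eq_none_iff _ _).mpr hx,
            (PySem.List.index?_eq_none_iff _ _).mpr (by simp [hx, hxw])]
      have hgetD : (pvLoop ws).1.getD w 0 = (k : Int) := by
        rw [PySem.Dict.getD_eq_get?_getD, ih1 w, hk]; rfl
      refine ⟨fun x => by rw [hidx x]; exact ih1 x, PySem.Set.nodup_add _ _ ih2, fun y => ?_⟩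
      rw [hgetD, PySem.Set.mem_add]
      constructor
      · rintro (hy | rfl)
        · obtain ⟨u, hu, hcu, rfl⟩ := (ih3 _).mp hy
          refine ⟨u, by simp [hu], ?_, by rw [hidx u]⟩
          simp only [PySem.List.count_eq, List.count_append] at *
          omega
        · refine ⟨w, by simp [hmem], ?_, by rw [hidx w, hk]; rfl⟩
          have h1 : 0 < List.count w ws := List.count_pos_iff.mpr hmem
          simp only [PySem.List.count_eq, List.count_append, List.count_singleton]
          simp
          omega
      · rintro ⟨u, hu, hcu, rfl⟩
        have humem : u ∈ ws := by
          rcases List.mem_append.mp hu with h | h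
          · exact h
          · simp at h; exact h ▸ hmem
        by_cases huw : u = w
        · right; subst huw; rw [hidx u, hk]; rfl
        · left
          refine (ih3 _).mpr ⟨u, humem, ?_, by rw [hidx u]⟩
          simp only [PySem.List.count_eq, List.count_append, List.count_singleton,
            beq_iff_eq] at hcu ⊢
          rw [if_neg (fun h => huw h.symm)] at hcu
          omega
    · have hc : (pvLoop ws).1.contains w = false := by
        rw [hcont, (PySem.List.index?_eq_none_iff _ _).mpr hmem]; rfl
      rw [hstep, if_neg (by simp [hc])]
      have hidxw : PySem.List.index? (ws ++ [w]) w = some ws.length :=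
        PySem.List.index?_append_singleton_self ws w hmem
      have hidx : ∀ x, x ≠ w → PySem.List.index? (ws ++ [w]) x = PySem.List.index? ws x := by
        intro x hxw
        by_cases hx : x ∈ ws
        · exact PySem.List.index?_append_of_mem [w] hx
        · rw [(PySem.List.index?_eq_none_iff _ _).mpr hx,
            (PySem.List.index?_eq_none_iff _ _).mpr (by simp [hx, hxw])]
      refine ⟨fun x => ?_, ih2, fun y => ?_⟩
      · rw [PySem.Dict.get?_insert]
        by_cases hxw : x = w
        · subst hxw; rw [if_pos rfl, hidxw]; simp
        · rw [if_neg hxw, hidx x hxw]; exact ih1 x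
      · rw [ih3 y]
        constructor
        · rintro ⟨u, hu, hcu, rfl⟩
          have huw : u ≠ w := fun h => hmem (h ▸ hu)
          refine ⟨u, by simp [hu], ?_, by rw [hidx u huw]⟩
          simp only [PySem.List.count_eq, List.count_append] at *
          omega
        · rintro ⟨u, hu, hcu, rfl⟩
          by_cases huw : u = w
          · subst huw
            exfalso
            rw [PySem.List.count_eq, List.count_append, List.count_eq_zero.mpr hmem] at hcu
            simp at hcu
          · have humem : u ∈ ws := by
              rcases List.mem_append.mp hu with h | h
              · exact h
              · simp at h; exact absurd h huw
            refine ⟨u, humem, ?_, by rw [hidx u huw]⟩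
            simp only [PySem.List.count_eq, List.count_append, List.count_singleton,
              beq_iff_eq] at hcu ⊢
            rw [if_neg (fun h => huw h.symm)] at hcu
            omega

theorem pvB_eq_spec (words : List String) : get_duplicate_indices_alt words = pvSpecList words := by
  obtain ⟨-, h2, h3⟩ := pvLoop_inv words
  have hB : get_duplicate_indices_alt words = PySem.List.sorted (pvLoop words).2 (fun x => x) false := rfl
  rw [hB]
  apply PySem.List.sorted_eq_of_perm_of_pairwise_lt
  · rw [List.perm_ext_iff_of_nodup ((pvSpec_pairwise words).imp ne_of_lt) h2]
    intro y
    rw [h3 y]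
    simp only [pvSpecList, List.mem_map, List.mem_filter, PySem.Set.mem_ofList,
      decide_eq_true_eq]
    constructor
    · rintro ⟨u, ⟨hu, hc⟩, rfl⟩; exact ⟨u, hu, hc, rfl⟩
    · rintro ⟨u, hu, hc, rfl⟩; exact ⟨u, ⟨hu, hc⟩, rfl⟩
  · exact pvSpec_pairwise words

-- ===== VERDICT (by name: the statement is the Claim_ definition above) =====
theorem get_duplicate_indices_spec : Claim_equal_get_duplicate_indices := by
  intro words _
  unfold Spec_get_duplicate_indices
  rw [pvA_eq_spec, pvB_eq_spec]
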